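-- pv_equiv track=rewrite | github.com/ekohilas/google-kickstart-2017 | round_f/b/io.py | max_honor
-- ===== SOURCE A (Python) =====
-- def max_honor(e, n, s):
--     h = 0
--     s.sort()
--     while s:
--         # dance
--         if e > s[0]:
--             e -= s.pop(0)
--             h += 1
--         else:
--             # recruit
--             if len(s) > 1 and s[-1] >= s[0] and h > 0:
--                 e += s.pop()
--                 h -= 1
--             else:
--                 break
--     return h
-- ===== SOURCE B (Python) =====
-- def max_honor(e, n, s):
--     # Two index pointers over one sorted array; no O(n) pop(0) calls.
--     # (Unlike A, this does not mutate s; the return value is identical.)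
--     a = sorted(s)
--     i, j = 0, len(a) - 1
--     h = 0
--     while i <= j:
--         if e > a[i]:
--             # dance: consume the cheapest remaining song
--             e -= a[i]
--             i += 1
--             h += 1
--         elif i < j and a[j] >= a[i] and h > 0:
--             # recruit: trade one honor for the largest remaining energy
--             e += a[j]
--             j -= 1
--             h -= 1
--         else:
--             break
--     return h
-- ===== Notes on version B (the rewrite author's own statement) =====
-- stated objective: faster
-- what changed: Replaces A's destructive list consumption via s.pop(0)/s.pop() (each pop(0) shifts the whole list) with two index pointers sweeping inward over the sorted array, so each loop step is O(1); B also leaves s unmutated.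
import Mathlib
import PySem

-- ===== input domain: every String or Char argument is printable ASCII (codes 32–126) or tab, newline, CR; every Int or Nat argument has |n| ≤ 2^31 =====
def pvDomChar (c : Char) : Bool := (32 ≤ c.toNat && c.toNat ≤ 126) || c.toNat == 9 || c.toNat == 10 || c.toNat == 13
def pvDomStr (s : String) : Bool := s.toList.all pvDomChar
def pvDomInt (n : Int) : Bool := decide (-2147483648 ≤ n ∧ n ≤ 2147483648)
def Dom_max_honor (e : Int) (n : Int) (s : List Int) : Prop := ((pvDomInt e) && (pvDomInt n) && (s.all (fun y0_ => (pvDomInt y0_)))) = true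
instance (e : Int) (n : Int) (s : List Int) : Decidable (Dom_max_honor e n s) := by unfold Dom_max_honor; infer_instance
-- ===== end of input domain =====

-- B replaces A's pop(0)/pop() consumption of the sorted list with two index pointers over one
-- sorted array (objective: faster). A mutates its argument s in place (sorts and drains it);
-- the equivalence proved here is about the return value only — B does not mutate s.

-- ===== PORT A =====
-- A's while-loop: each iteration pops one element (front or back), so recursion on s.length.
def pvLoopA (e h : Int) (s : List Int) : Int :=
  match s with
  | [] => h
  | x :: rest =>
    if e > x then
      pvLoopA (e - x) (h + 1) rest
    else if rest ≠ [] ∧ (x :: rest).getLastD 0 ≥ x ∧ h > 0 then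
      pvLoopA (e + (x :: rest).getLastD 0) (h - 1) (x :: rest).dropLast
    else h
termination_by s.length
decreasing_by
  · simp
  · simp

def max_honor (e : Int) (n : Int) (s : List Int) : Int :=
  pvLoopA e 0 (PySem.List.sorted s id false)

-- ===== PORT B =====
-- Source B's while-loop over indices i, j; the indices stay inside [0, len) whenever read,
-- so a[i]/a[j] are pyGetD with an unused default.
def pvLoopB (a : List Int) (e h i j : Int) : Int :=
  if i ≤ j then
    if e > PySem.List.pyGetD a i 0 then
      pvLoopB a (e - PySem.List.pyGetD a i 0) (h + 1) (i + 1) j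
    else if i < j ∧ PySem.List.pyGetD a j 0 ≥ PySem.List.pyGetD a i 0 ∧ h > 0 then
      pvLoopB a (e + PySem.List.pyGetD a j 0) (h - 1) i (j - 1)
    else h
  else h
termination_by (j + 1 - i).toNat
decreasing_by
  · omega
  · omega

def max_honor_alt (e : Int) (n : Int) (s : List Int) : Int :=
  let a := PySem.List.sorted s id false
  pvLoopB a e 0 0 ((a.length : Int) - 1)

-- ===== PRECONDITION & SPEC =====
def Spec_max_honor (e : Int) (n : Int) (s : List Int) (out : Int) : Prop := out = max_honor_alt e n s
instance (e : Int) (n : Int) (s : List Int) (out : Int) : Decidable (Spec_max_honor e n s out) := by unfold Spec_max_honor; infer_instance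

-- ===== CLAIM (what is proved, stated in full; the proofs are below) =====
def Claim_equal_max_honor : Prop := ∀ (e : Int) (n : Int) (s : List Int), Dom_max_honor e n s → Spec_max_honor e n s (max_honor e n s)

-- ===== LEMMAS AND PROOFS =====

lemma pvLoopA_nil (e h : Int) : pvLoopA e h [] = h := by
  rw [pvLoopA.eq_def]

lemma pvLoopA_cons (e h x : Int) (rest : List Int) :
    pvLoopA e h (x :: rest) =
      if e > x then pvLoopA (e - x) (h + 1) rest
      else if rest ≠ [] ∧ (x :: rest).getLastD 0 ≥ x ∧ h > 0 then
        pvLoopA (e + (x :: rest).getLastD 0) (h - 1) (x :: rest).dropLast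
      else h := by
  rw [pvLoopA.eq_def]

lemma pvLoopB_eq (a : List Int) (e h i j : Int) :
    pvLoopB a e h i j =
      if i ≤ j then
        if e > PySem.List.pyGetD a i 0 then
          pvLoopB a (e - PySem.List.pyGetD a i 0) (h + 1) (i + 1) j
        else if i < j ∧ PySem.List.pyGetD a j 0 ≥ PySem.List.pyGetD a i 0 ∧ h > 0 then
          pvLoopB a (e + PySem.List.pyGetD a j 0) (h - 1) i (j - 1)
        else h
      else h := by
  rw [pvLoopB]

-- The window a[i..j] that B's pointers delimit is exactly A's remaining list.
lemma pv_loop_eq (a : List Int) :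
    ∀ (k i j : Nat) (e h : Int), j + 1 - i ≤ k → j < a.length →
      pvLoopB a e h (i : Int) (j : Int) = pvLoopA e h ((a.drop i).take (j + 1 - i)) := by
  intro k
  induction k with
  | zero =>
    intro i j e h hk hj
    have hij : j < i := by omega
    have h0 : j + 1 - i = 0 := by omega
    rw [h0]
    simp only [List.take_zero]
    rw [pvLoopB_eq, pvLoopA_nil, if_neg (not_le.mpr (by exact_mod_cast hij))]
  | succ k ih =>
    intro i j e h hk hj
    by_cases hij : i ≤ j
    · -- nonempty window
      have hi : i < a.length := by omega
      have hdrop : a.drop i = a[i] :: a.drop (i + 1) := List.drop_eq_getElem_cons hi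
      have hwin : (a.drop i).take (j + 1 - i) = a[i] :: (a.drop (i + 1)).take (j - i) := by
        rw [hdrop]
        have h1 : j + 1 - i = (j - i) + 1 := by omega
        rw [h1, List.take_succ_cons]
      have hrestlen : ((a.drop (i + 1)).take (j - i)).length = j - i := by
        simp
        omega
      have hlen : ((a.drop i).take (j + 1 - i)).length = j + 1 - i := by
        simp
        omega
      have hlast : ((a.drop i).take (j + 1 - i)).getLastD 0 = a[j] := by
        rw [List.getLastD_eq_getLast?, List.getLast?_eq_getElem?]
        rw [hlen]
        have h1 : j + 1 - i - 1 < ((a.drop i).take (j + 1 - i)).length := by omega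
        rw [List.getElem?_eq_getElem h1]
        simp only [List.getElem_take, List.getElem_drop]
        simp
        congr 1
        omega
      have hheadD : PySem.List.pyGetD a (i : Int) 0 = a[i] := by
        rw [PySem.List.pyGetD_natCast]
        exact List.getD_eq_getElem a 0 hi
      have hlastD : PySem.List.pyGetD a (j : Int) 0 = a[j] := by
        rw [PySem.List.pyGetD_natCast]
        exact List.getD_eq_getElem a 0 hj
      have hrestne : ((a.drop (i + 1)).take (j - i) ≠ []) ↔ i < j := by
        rw [← List.length_pos_iff_ne_nil, hrestlen]
        omega
      have hlast' : (a[i] :: (a.drop (i + 1)).take (j - i)).getLastD 0 = a[j] := by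
        rw [← hwin]; exact hlast
      rw [hwin, pvLoopA_cons, pvLoopB_eq, hheadD, hlastD, hlast',
        if_pos (show (i : Int) ≤ (j : Int) by exact_mod_cast hij)]
      simp only [hrestne, Nat.cast_lt]
      by_cases hdance : e > a[i]
      · rw [if_pos hdance, if_pos hdance]
        have hc : ((i : Int) + 1) = ((i + 1 : Nat) : Int) := by push_cast; ring
        rw [hc, ih (i + 1) j (e - a[i]) (h + 1) (by omega) hj]
        congr 2
        omega
      · rw [if_neg hdance, if_neg hdance]
        by_cases hrec : i < j ∧ a[j] ≥ a[i] ∧ h > 0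
        · rw [if_pos hrec, if_pos hrec]
          have hj1 : 1 ≤ j := by omega
          have hc : ((j : Int) - 1) = ((j - 1 : Nat) : Int) := by omega
          rw [hc, ih i (j - 1) (e + a[j]) (h - 1) (by omega) (by omega)]
          congr 1
          have hdl : (a[i] :: (a.drop (i + 1)).take (j - i)).dropLast
              = ((a.drop i).take (j + 1 - i)).take ((j + 1 - i) - 1) := by
            rw [← hwin, List.dropLast_eq_take, hlen]
          rw [hdl, List.take_take]
          congr 1
          omega
        · rw [if_neg hrec, if_neg hrec]
    · -- empty window: both sides return h
      have h0 : j + 1 - i = 0 := by omega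
      rw [h0]
      simp only [List.take_zero]
      rw [pvLoopB_eq, pvLoopA_nil, if_neg (not_le.mpr (by exact_mod_cast (by omega : j < i)))]

-- ===== VERDICT (by name: the statement is the Claim_ definition above) =====
theorem max_honor_spec : Claim_equal_max_honor := by
  intro e n s _
  unfold Spec_max_honor max_honor max_honor_alt
  show pvLoopA e 0 (PySem.List.sorted s id false)
      = pvLoopB (PySem.List.sorted s id false) e 0 0
          (((PySem.List.sorted s id false).length : Int) - 1)
  generalize PySem.List.sorted s id false = a
  cases a with
  | nil =>
    rw [pvLoopB_eq, pvLoopA_nil, if_neg (by norm_num)]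
  | cons x t =>
    have hlen : 1 ≤ (x :: t).length := by simp
    have h0 : ((x :: t).length : Int) - 1 = (((x :: t).length - 1 : Nat) : Int) := by omega
    have key := pv_loop_eq (x :: t) ((x :: t).length) 0 ((x :: t).length - 1) e
      ((0 : Nat) : Int) (by omega) (by omega)
    rw [h0, show (0 : Int) = ((0 : Nat) : Int) from rfl, key, List.drop_zero,
      show (x :: t).length - 1 + 1 - 0 = (x :: t).length from by omega, List.take_length]
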